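-- pv_equiv track=rewrite | github.com/xiaodianzheng/CS602-Algorithm-Design-and-Implementation | AlgorithmAssignment4/A4Q1.py | calculate_rd
-- ===== SOURCE A (Python) =====
-- def calculate_rd(pos):
--     rd = [0 for _ in range(14)]
--     for i in range(14):
--         for p in pos:
--             cur_ld = 13 - p[1] + p[0] - i
--             if cur_ld < 0 or cur_ld > 13:
--                 continue
--             else:
--                 rd[i] |= (1 << 13 - p[1] + p[0] - i)
--     return rd
-- ===== SOURCE B (Python) =====
-- def calculate_rd(pos):
--     m = 0
--     for p in pos:
--         base = 13 - p[1] + p[0]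
--         if 0 <= base <= 26:
--             m |= 1 << base
--     return [(m >> i) & 0x3FFF for i in range(14)]
-- ===== Notes on version B (the rewrite author's own statement) =====
-- stated objective: faster
-- what changed: B builds one aggregate bitmask m of all valid diagonal bases in a single pass over the positions and then derives every rd[i] as (m >> i) & 0x3FFF, removing A's 14-index outer loop and all per-index per-position work.
import Mathlib
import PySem

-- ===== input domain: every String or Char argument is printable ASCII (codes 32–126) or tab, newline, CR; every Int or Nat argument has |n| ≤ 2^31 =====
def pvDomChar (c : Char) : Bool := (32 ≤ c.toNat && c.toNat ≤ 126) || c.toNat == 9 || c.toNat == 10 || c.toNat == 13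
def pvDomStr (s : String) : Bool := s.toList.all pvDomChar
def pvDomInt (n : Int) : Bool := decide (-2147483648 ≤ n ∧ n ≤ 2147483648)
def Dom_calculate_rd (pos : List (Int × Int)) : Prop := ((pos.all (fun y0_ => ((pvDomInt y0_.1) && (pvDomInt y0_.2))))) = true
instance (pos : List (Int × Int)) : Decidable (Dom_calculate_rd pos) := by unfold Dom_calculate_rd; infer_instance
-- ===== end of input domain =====

-- ===== PORT A =====
-- literal transliteration of A: outer loop over range(14), inner loop over pos,
-- guard `cur_ld < 0 or cur_ld > 13`, then rd[i] |= 1 << (13 - p[1] + p[0] - i)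
def calculate_rd (pos : List (Int × Int)) : List Int :=
  (List.range 14).foldl (fun rd (i : Nat) =>
    pos.foldl (fun rd p =>
      let cur_ld : Int := 13 - p.2 + p.1 - (i : Int)
      if cur_ld < 0 ∨ cur_ld > 13 then rd
      else rd.set i (PySem.Int.bor (rd.getD i 0) ((1 : Int) <<< (13 - p.2 + p.1 - (i : Int)).toNat)))
      rd)
    (List.replicate 14 0)

-- ===== PORT B =====
-- B (one honest line): single pass builds one aggregate bitmask m of all valid bases,
-- then rd[i] = (m >> i) & 0x3FFF — a different algorithm doing one pass instead of 14.
-- literal transliteration of Source B: for-loop accumulating m, then a comprehension over range(14)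
def calculate_rd_alt (pos : List (Int × Int)) : List Int :=
  let m : Int := pos.foldl (fun m p =>
    let base : Int := 13 - p.2 + p.1
    if 0 ≤ base ∧ base ≤ 26 then PySem.Int.bor m ((1 : Int) <<< base.toNat) else m) 0
  (List.range 14).map (fun (i : Nat) => PySem.Int.band (m >>> i) 16383)

-- ===== PRECONDITION & SPEC =====
def Spec_calculate_rd (pos : List (Int × Int)) (out : List Int) : Prop := out = calculate_rd_alt pos
instance (pos : List (Int × Int)) (out : List Int) : Decidable (Spec_calculate_rd pos out) := by unfold Spec_calculate_rd; infer_instance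

-- ===== CLAIM (what is proved, stated in full; the proofs are below) =====
def Claim_equal_calculate_rd : Prop := ∀ (pos : List (Int × Int)), Dom_calculate_rd pos → Spec_calculate_rd pos (calculate_rd pos)

-- ===== LEMMAS AND PROOFS =====

-- named copy of A's inner-loop body
def pvStepA (j : Nat) (rd : List Int) (p : Int × Int) : List Int :=
  if 13 - p.2 + p.1 - (j : Int) < 0 ∨ 13 - p.2 + p.1 - (j : Int) > 13 then rd
  else rd.set j (PySem.Int.bor (rd.getD j 0) ((1 : Int) <<< (13 - p.2 + p.1 - (j : Int)).toNat))

-- named copy of B's mask-accumulating loop body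
def pvStepB (m : Int) (p : Int × Int) : Int :=
  if 0 ≤ 13 - p.2 + p.1 ∧ 13 - p.2 + p.1 ≤ 26 then PySem.Int.bor m ((1 : Int) <<< (13 - p.2 + p.1).toNat) else m

theorem pvA_eq (pos : List (Int × Int)) :
    calculate_rd pos =
      (List.range 14).foldl (fun rd j => pos.foldl (pvStepA j) rd) (List.replicate 14 0) := rfl

theorem pvB_eq (pos : List (Int × Int)) :
    calculate_rd_alt pos =
      (List.range 14).map (fun (i : Nat) => PySem.Int.band ((pos.foldl pvStepB 0) >>> i) 16383) := rfl

-- the per-index value A computes: fold over pos, OR-ing in bit (13 - p.2 + p.1 - i) when in range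
def pvVal (i : Nat) (x : Int) : List (Int × Int) → Int
  | [] => x
  | p :: ps =>
      pvVal i
        (if 13 - p.2 + p.1 - (i : Int) < 0 ∨ 13 - p.2 + p.1 - (i : Int) > 13 then x
         else PySem.Int.bor x ((1 : Int) <<< (13 - p.2 + p.1 - (i : Int)).toNat)) ps

-- ---- A side ----

-- A's inner fold (fixed index j): it only touches index j, where it computes pvVal
theorem pvA_inner (pos : List (Int × Int)) (j : Nat) (hj : j < 14) :
    ∀ rd : List Int, rd.length = 14 →
      (pos.foldl (pvStepA j) rd).length = 14 ∧
      ∀ i : Nat, i < 14 →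
        (pos.foldl (pvStepA j) rd).getD i 0 =
          if i = j then pvVal j (rd.getD j 0) pos else rd.getD i 0 := by
  induction pos with
  | nil =>
      intro rd hlen
      refine ⟨hlen, ?_⟩
      intro i hi
      rw [List.foldl_nil]
      by_cases hij : i = j
      · subst hij; rw [if_pos rfl]; rfl
      · rw [if_neg hij]
  | cons p ps ih =>
      intro rd hlen
      rw [List.foldl_cons]
      by_cases hcur : 13 - p.2 + p.1 - (j : Int) < 0 ∨ 13 - p.2 + p.1 - (j : Int) > 13
      · rw [show pvStepA j rd p = rd from by unfold pvStepA; rw [if_pos hcur]]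
        obtain ⟨h1, h2⟩ := ih rd hlen
        refine ⟨h1, ?_⟩
        intro i hi
        rw [h2 i hi]
        by_cases hij : i = j
        · subst hij; rw [if_pos rfl, if_pos rfl, pvVal, if_pos hcur]
        · rw [if_neg hij, if_neg hij]
      · rw [show pvStepA j rd p
              = rd.set j (PySem.Int.bor (rd.getD j 0) ((1 : Int) <<< (13 - p.2 + p.1 - (j : Int)).toNat))
            from by unfold pvStepA; rw [if_neg hcur]]
        have hset : (rd.set j (PySem.Int.bor (rd.getD j 0) ((1 : Int) <<< (13 - p.2 + p.1 - (j : Int)).toNat))).length = 14 := by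
          simpa using hlen
        obtain ⟨h1, h2⟩ := ih _ hset
        refine ⟨h1, ?_⟩
        intro i hi
        rw [h2 i hi]
        by_cases hij : i = j
        · subst hij
          rw [if_pos rfl, if_pos rfl, pvVal, if_neg hcur]
          congr 1
          rw [List.getD_eq_getElem?_getD, List.getElem?_set_self (by omega : i < rd.length)]
          rfl
        · rw [if_neg hij, if_neg hij, List.getD_eq_getElem?_getD,
              List.getElem?_set_ne (fun h => hij h.symm), List.getD_eq_getElem?_getD]

-- A's outer fold over range k: indices below k hold pvVal, the rest are still 0
theorem pvA_outer (pos : List (Int × Int)) (k : Nat) (hk : k ≤ 14) :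
    ((List.range k).foldl (fun rd j => pos.foldl (pvStepA j) rd) (List.replicate 14 0)).length = 14 ∧
    ∀ i : Nat, i < 14 →
      ((List.range k).foldl (fun rd j => pos.foldl (pvStepA j) rd) (List.replicate 14 0)).getD i 0 =
        if i < k then pvVal i 0 pos else 0 := by
  induction k with
  | zero =>
      refine ⟨by simp, ?_⟩
      intro i hi
      rw [List.range_zero, List.foldl_nil, List.getD_eq_getElem?_getD, List.getElem?_replicate,
          if_pos hi, if_neg (by omega : ¬ i < 0)]
      rfl
  | succ k ih =>
      obtain ⟨h1, h2⟩ := ih (by omega)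
      rw [List.range_succ, List.foldl_append, List.foldl_cons, List.foldl_nil]
      obtain ⟨g1, g2⟩ := pvA_inner pos k (by omega) _ h1
      refine ⟨g1, ?_⟩
      intro i hi
      rw [g2 i hi]
      by_cases hik : i = k
      · subst hik
        rw [if_pos rfl, h2 i hi, if_neg (by omega), if_pos (by omega)]
      · rw [if_neg hik, h2 i hi]
        by_cases hlt : i < k
        · rw [if_pos hlt, if_pos (by omega)]
        · rw [if_neg hlt, if_neg (by omega)]

-- ---- B side ----

-- Nat-level core fact: OR-ing bit b into the mask and then extracting window i
-- ORs bit (b - i) into the extracted window exactly when i ≤ b ≤ i + 13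
theorem pvNatKey (n b i : Nat) :
    ((n ||| (1 <<< b)) >>> i) &&& 16383 =
      ((n >>> i) &&& 16383) ||| (if i ≤ b ∧ b ≤ i + 13 then (1 <<< (b - i)) else 0) := by
  apply Nat.eq_of_testBit_eq
  intro j
  have h16383 : (16383 : Nat) = 2 ^ 14 - 1 := by norm_num
  by_cases hc : i ≤ b ∧ b ≤ i + 13
  · rw [if_pos hc]
    simp only [Nat.testBit_and, Nat.testBit_or, Nat.testBit_shiftRight, h16383,
      Nat.testBit_two_pow_sub_one, Nat.one_shiftLeft, Nat.testBit_two_pow]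
    by_cases hj : j = b - i
    · subst hj
      have h2 : i + (b - i) = b := by omega
      have h3 : b - i < 14 := by omega
      simp [h2, h3]
    · have e1 : ¬ (b = i + j) := by omega
      have e2 : ¬ (b - i = j) := fun h => hj h.symm
      simp [e1, e2]
  · rw [if_neg hc]
    simp only [Nat.testBit_and, Nat.testBit_or, Nat.testBit_shiftRight, h16383,
      Nat.testBit_two_pow_sub_one, Nat.one_shiftLeft, Nat.testBit_two_pow, Nat.or_zero]
    by_cases h : b = i + j
    · have h14 : ¬ (j < 14) := by omega
      simp [h, h14]
    · simp [h]

-- cast bridges: Int shifts/bitops on nonnegative values are the Nat ones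
theorem pvShiftLeft_one (k : Nat) : ((1 : Int) <<< k) = (((1 <<< k : Nat) : Nat) : Int) := by
  simp [Int.shiftLeft_eq, Nat.one_shiftLeft]

theorem pvShiftRight_natCast (n i : Nat) : ((n : Int) >>> i) = ((n >>> i : Nat) : Int) := by
  simp [Int.natCast_shiftRight]

-- B's fold carries a nonnegative mask; window-extract of it computes pvVal
theorem pvB_key (pos : List (Int × Int)) :
    ∀ (n : Nat) (i : Nat), i < 14 →
      PySem.Int.band ((pos.foldl pvStepB (n : Int)) >>> i) 16383 =
        pvVal i (((n >>> i) &&& 16383 : Nat) : Int) pos := by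
  induction pos with
  | nil =>
      intro n i hi
      rw [List.foldl_nil, pvVal, pvShiftRight_natCast]
      rw [show (16383 : Int) = ((16383 : Nat) : Int) from rfl, PySem.Int.band_natCast]
  | cons p ps ih =>
      intro n i hi
      rw [List.foldl_cons, pvVal]
      by_cases hb : 0 ≤ 13 - p.2 + p.1 ∧ 13 - p.2 + p.1 ≤ 26
      · rw [show pvStepB (n : Int) p
              = PySem.Int.bor (n : Int) ((1 : Int) <<< (13 - p.2 + p.1).toNat)
            from by unfold pvStepB; rw [if_pos hb]]
        rw [pvShiftLeft_one, PySem.Int.bor_natCast,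
            ih (n ||| (1 <<< (13 - p.2 + p.1).toNat)) i hi,
            pvNatKey n (13 - p.2 + p.1).toNat i]
        by_cases hc : 13 - p.2 + p.1 - (i : Int) < 0 ∨ 13 - p.2 + p.1 - (i : Int) > 13
        · rw [if_pos hc,
              if_neg (show ¬ (i ≤ (13 - p.2 + p.1).toNat ∧ (13 - p.2 + p.1).toNat ≤ i + 13) by omega),
              Nat.or_zero]
        · rw [if_neg hc,
              if_pos (show i ≤ (13 - p.2 + p.1).toNat ∧ (13 - p.2 + p.1).toNat ≤ i + 13 by omega)]
          have he : (13 - p.2 + p.1).toNat - i = (13 - p.2 + p.1 - (i : Int)).toNat := by omega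
          rw [he, pvShiftLeft_one, ← PySem.Int.bor_natCast]
      · rw [show pvStepB (n : Int) p = (n : Int) from by unfold pvStepB; rw [if_neg hb]]
        rw [ih n i hi, if_pos (by omega)]

-- two length-14 lists with equal getD at every index < 14 are equal
theorem pvListEq (xs ys : List Int) (hx : xs.length = 14) (hy : ys.length = 14)
    (h : ∀ i : Nat, i < 14 → xs.getD i 0 = ys.getD i 0) : xs = ys := by
  apply List.ext_getElem (by omega)
  intro i hi1 hi2
  have := h i (by omega)
  simpa [List.getD_eq_getElem?_getD, List.getElem?_eq_getElem, hi1, hi2] using this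

-- ===== VERDICT (by name: the statement is the Claim_ definition above) =====
theorem calculate_rd_spec : Claim_equal_calculate_rd := by
  intro pos _
  unfold Spec_calculate_rd
  rw [pvA_eq, pvB_eq]
  obtain ⟨ha1, ha2⟩ := pvA_outer pos 14 le_rfl
  apply pvListEq _ _ ha1 (by simp)
  intro i hi
  rw [ha2 i hi, if_pos hi]
  have hmap : ((List.range 14).map (fun (i : Nat) => PySem.Int.band ((pos.foldl pvStepB 0) >>> i) 16383)).getD i 0
      = PySem.Int.band ((pos.foldl pvStepB 0) >>> i) 16383 := by
    simp [List.getD_eq_getElem?_getD, List.getElem?_range hi]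
  rw [hmap]
  have hkey := pvB_key pos 0 i hi
  rw [show ((0 : Nat) : Int) = (0 : Int) from rfl] at hkey
  rw [hkey]
  simp
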